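-- pv_equiv track=rewrite | github.com/taka-toshi/pro-B | required_warmth.py | calculate_required_warmth
-- ===== SOURCE A (Python) =====
-- import math
--
-- def calculate_required_warmth(DI_list):
--     # 必要な暖かさを計算
--     # ~50 → 9 * 5
--     # 50~55 → 8 * 5
--     # 55~60 → 7 * 5
--     # 60~65 → 6 * 5
--     # 65~70 → 5 * 5
--     # 70~75 → 4 * 5
--     # 75~80 → 3 * 5
--     # 80~85 → 2 * 5
--     # 85~ → 1 * 5
--     required_warmth = []
--     for DI in DI_list:
--         DI -= 50
--         if DI < 0:
--             required_warmth.append(9 * 5)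
--         elif DI >=35:
--             required_warmth.append(1 * 5)
--         else:
--             rank = 8 - math.floor(DI / 5)
--             if type(rank) is not int:
--                 raise ValueError
--             if rank < 2 or rank > 8:
--                 raise ValueError
--             required_warmth.append(rank * 5)
--     return required_warmth
-- ===== SOURCE B (Python) =====
-- THRESHOLDS = (50, 55, 60, 65, 70, 75, 80, 85)
--
-- def calculate_required_warmth(DI_list):
--     # Level starts at 9 and drops by one for every bucket boundary at or below DI.
--     required_warmth = []
--     for DI in DI_list:
--         level = 9
--         for t in THRESHOLDS:
--             if DI >= t:
--                 level -= 1
--         required_warmth.append(5 * level)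
--     return required_warmth
-- ===== Notes on version B (the rewrite author's own statement) =====
-- stated objective: alternative
-- what changed: Replaces A's arithmetic bucketing (subtract 50, floor-divide by 5, range checks with dead ValueError paths) by a threshold-table scan: level = 9 minus the number of bucket boundaries (50,55,...,85) at or below DI, times 5.
import Mathlib
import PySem

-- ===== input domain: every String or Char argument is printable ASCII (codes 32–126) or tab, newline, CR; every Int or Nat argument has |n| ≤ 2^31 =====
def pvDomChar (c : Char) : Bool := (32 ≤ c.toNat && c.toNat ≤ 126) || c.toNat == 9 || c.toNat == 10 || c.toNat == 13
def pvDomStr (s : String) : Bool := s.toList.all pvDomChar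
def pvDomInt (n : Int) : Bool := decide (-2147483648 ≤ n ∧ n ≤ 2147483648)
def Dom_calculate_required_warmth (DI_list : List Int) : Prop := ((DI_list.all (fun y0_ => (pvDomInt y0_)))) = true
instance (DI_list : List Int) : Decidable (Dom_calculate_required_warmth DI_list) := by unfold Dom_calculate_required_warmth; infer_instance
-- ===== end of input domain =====

-- B replaces A's arithmetic bucketing (floor-division with dead ValueError checks)
-- by a scan of an 8-entry threshold table counting boundaries at or below DI;
-- objective: alternative (same cost, different mechanism).

-- ===== PORT A =====
-- A's loop body: DI -= 50; three branches; the two ValueError raises are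
-- unreachable (in the else branch 0 ≤ DI < 35 forces 2 ≤ rank ≤ 8, and
-- math.floor returns int), so A is total and the port keeps the branch order.
def calculate_required_warmth (DI_list : List Int) : List Int :=
  DI_list.foldl (fun required_warmth DI0 =>
    let DI := DI0 - 50
    if DI < 0 then required_warmth ++ [9 * 5]
    else if DI ≥ 35 then required_warmth ++ [1 * 5]
    else
      let rank := 8 - PySem.Int.floordiv DI 5
      required_warmth ++ [rank * 5]) []

-- ===== PORT B =====
def pvThresholds : List Int := [50, 55, 60, 65, 70, 75, 80, 85]

def calculate_required_warmth_alt (DI_list : List Int) : List Int :=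
  DI_list.foldl (fun required_warmth DI =>
    let level := pvThresholds.foldl (fun level t => if DI ≥ t then level - 1 else level) (9 : Int)
    required_warmth ++ [5 * level]) []

-- ===== PRECONDITION & SPEC =====
def Spec_calculate_required_warmth (DI_list : List Int) (out : List Int) : Prop := out = calculate_required_warmth_alt DI_list
instance (DI_list : List Int) (out : List Int) : Decidable (Spec_calculate_required_warmth DI_list out) := by unfold Spec_calculate_required_warmth; infer_instance

-- ===== CLAIM =====
def Claim_equal_calculate_required_warmth : Prop := ∀ (DI_list : List Int), Dom_calculate_required_warmth DI_list → Spec_calculate_required_warmth DI_list (calculate_required_warmth DI_list)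

-- ===== LEMMAS AND PROOFS =====

-- The inner threshold scan subtracts one per threshold at or below d.
theorem pv_fold_count (d : Int) (ts : List Int) (l : Int) :
    ts.foldl (fun level t => if d ≥ t then level - 1 else level) l
    = l - (ts.countP (fun t => decide (d ≥ t)) : Int) := by
  induction ts generalizing l with
  | nil => simp
  | cons t ts ih =>
    simp only [List.foldl_cons, List.countP_cons, ih, decide_eq_true_eq]
    split_ifs <;> push_cast <;> omega

-- A's per-element value equals B's per-element threshold count.
set_option maxHeartbeats 1000000 in
theorem pv_elem_eq (d : Int) :
    (if d - 50 < 0 then (9 * 5 : Int)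
     else if d - 50 ≥ 35 then 1 * 5
     else (8 - PySem.Int.floordiv (d - 50) 5) * 5)
    = 5 * pvThresholds.foldl (fun level t => if d ≥ t then level - 1 else level) (9 : Int) := by
  have h5 : (0:Int) < 5 := by norm_num
  have hq0 : ¬ (d - 50 < 0) → 0 ≤ PySem.Int.floordiv (d - 50) 5 := fun h =>
    (PySem.Int.le_floordiv_iff_mul_le (q := 0) h5).mpr (by omega)
  have hq6 : ¬ (d - 50 ≥ 35) → PySem.Int.floordiv (d - 50) 5 < 7 := fun h =>
    (PySem.Int.floordiv_lt_iff_lt_mul (q := 7) h5).mpr (by omega)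
  have hlo : PySem.Int.floordiv (d - 50) 5 * 5 ≤ d - 50 :=
    (PySem.Int.le_floordiv_iff_mul_le h5).mp le_rfl
  have hhi : d - 50 < (PySem.Int.floordiv (d - 50) 5 + 1) * 5 :=
    (PySem.Int.floordiv_lt_iff_lt_mul h5).mp (by omega)
  rw [pv_fold_count]
  simp only [pvThresholds, List.countP_cons, List.countP_nil, decide_eq_true_eq]
  generalize PySem.Int.floordiv (d - 50) 5 = q at *
  by_cases h1 : d - 50 < 0
  · have := hlo; have := hhi
    split_ifs <;> push_cast <;> omega
  · have h0 := hq0 h1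
    by_cases h2 : d - 50 ≥ 35
    · split_ifs <;> push_cast <;> omega
    · have h6 := hq6 h2
      split_ifs <;> push_cast <;> omega

theorem pv_fold_eq (l : List Int) (accA accB : List Int) (h : accA = accB) :
    l.foldl (fun required_warmth DI0 =>
      let DI := DI0 - 50
      if DI < 0 then required_warmth ++ [9 * 5]
      else if DI ≥ 35 then required_warmth ++ [1 * 5]
      else
        let rank := 8 - PySem.Int.floordiv DI 5
        required_warmth ++ [rank * 5]) accA
    = l.foldl (fun required_warmth DI =>
        let level := pvThresholds.foldl (fun level t => if DI ≥ t then level - 1 else level) (9 : Int)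
        required_warmth ++ [5 * level]) accB := by
  induction l generalizing accA accB with
  | nil => simpa using h
  | cons d t ih =>
    simp only [List.foldl_cons]
    apply ih
    subst h
    have := pv_elem_eq d
    split_ifs at this ⊢ <;> rw [this]

-- ===== VERDICT =====
theorem calculate_required_warmth_spec : Claim_equal_calculate_required_warmth := by
  intro l _
  unfold Spec_calculate_required_warmth calculate_required_warmth calculate_required_warmth_alt
  exact pv_fold_eq l [] [] rfl
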